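-- pv_equiv track=rewrite | github.com/MazinLab/MKIDGen3 | mkidgen3/crossbar.py | condense_down
-- ===== SOURCE A (Python) =====
-- def propagate(v):
--     return v[1] > 0
--
-- def condense_down(in_left: list):
--         nrow = len(in_left)
--         out_right = [(None, 0)] * nrow
--         row_free = [False] * nrow
--
--         # Row N-1
--         if propagate(in_left[nrow - 1]):
--             row_free[nrow - 1] = False
--             last_consecutive_unused_ndx = nrow - 2
--             out_right[nrow - 1] = in_left[nrow - 1]
--         else:
--             out_right[nrow - 1] = in_left[nrow - 1]  # propagating only for visualization
--             last_consecutive_unused_ndx = nrow - 1  # just assume all rows are free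
--             row_free[nrow - 1] = True
--
--         # Rows 0 to n-2
--         for i in range(nrow - 2, -1, -1):
--             if row_free[i + 1]: # row below free
--                 if propagate(in_left[i]):
--                     last_consecutive_unused_ndx = i
--                     out_right[i + 1] = in_left[i]
--                 else:
--                     assert last_consecutive_unused_ndx > i
--                     out_right[i + 1] = in_left[i]  # propagating only for visualization
--                 row_free[i] = True
--
--             else:
--                 if propagate(in_left[i]):
--                     out_right[i] = in_left[i]
--                     row_free[i] = False
--                     last_consecutive_unused_ndx = i-1  # assume row before free for now
--                 else:
--                     assert last_consecutive_unused_ndx == i  # no change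
--                     out_right[i] = in_left[i]  # propagating only for visualization
--                     row_free[i] = True
--
--         return out_right, last_consecutive_unused_ndx
-- ===== SOURCE B (Python) =====
-- def propagate(v):
--     return v[1] > 0
--
-- def condense_down(in_left: list):
--     n = len(in_left)
--     # suffix-OR scan: free[i] == some row j >= i does not propagate
--     free = [False] * n
--     acc = False
--     for i in range(n - 1, -1, -1):
--         acc = acc or not propagate(in_left[i])
--         free[i] = acc
--     # place rows: a free slot below shifts row i down by one
--     out_right = []
--     for k in range(n):
--         if k == 0:
--             out_right.append(in_left[0] if (n == 1 or not free[1]) else (None, 0))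
--         elif free[k]:
--             out_right.append(in_left[k - 1])
--         else:
--             out_right.append(in_left[k])
--     # last_consecutive_unused_ndx from the first propagating row
--     m = next((i for i, v in enumerate(in_left) if propagate(v)), None)
--     if m is None:
--         last = n - 1
--     elif m == n - 1:
--         last = n - 2
--     elif free[m + 1]:
--         last = m
--     else:
--         last = m - 1
--     return out_right, last
-- ===== Notes on version B (the rewrite author's own statement) =====
-- stated objective: alternative
-- what changed: Replaces A's single stateful bottom-up loop (mutating out_right, row_free and last_consecutive_unused_ndx together) by three independent passes: a suffix-OR scan computing free[i], a direct per-slot placement formula, and a closed-form last index derived from the first propagating row.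
import Mathlib
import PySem

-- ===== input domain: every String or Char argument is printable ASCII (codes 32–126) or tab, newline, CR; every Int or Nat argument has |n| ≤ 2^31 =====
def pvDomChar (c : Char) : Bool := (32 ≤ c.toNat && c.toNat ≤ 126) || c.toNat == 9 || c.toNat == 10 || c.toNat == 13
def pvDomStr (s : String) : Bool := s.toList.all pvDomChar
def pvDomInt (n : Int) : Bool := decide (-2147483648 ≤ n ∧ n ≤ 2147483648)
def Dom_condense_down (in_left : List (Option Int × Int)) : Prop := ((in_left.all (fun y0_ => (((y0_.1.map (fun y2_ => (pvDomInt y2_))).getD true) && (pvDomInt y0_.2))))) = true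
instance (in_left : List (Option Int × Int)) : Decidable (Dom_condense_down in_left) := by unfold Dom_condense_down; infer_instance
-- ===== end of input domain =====

-- B replaces A's single stateful bottom-up loop by three independent passes
-- (suffix-OR "free" scan, per-slot placement formula, closed-form last index);
-- objective: alternative decomposition, same O(n) cost.

-- ===== PORT A =====
-- helper `propagate` of the module
def pvPropagate (v : Option Int × Int) : Bool := decide (v.2 > 0)

-- one iteration of A's `for i in range(nrow-2, -1, -1)` body; state = (out_right, row_free, last)
def pvStepA (in_left : List (Option Int × Int))
    (st : List (Option Int × Int) × List Bool × Int) (i : Nat) :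
    List (Option Int × Int) × List Bool × Int :=
  let outr := st.1
  let rf := st.2.1
  let last := st.2.2
  if rf.getD (i+1) false then
    if pvPropagate (in_left.getD i (none, 0)) then
      (outr.set (i+1) (in_left.getD i (none, 0)), rf.set i true, (i : Int))
    else
      (outr.set (i+1) (in_left.getD i (none, 0)), rf.set i true, last)
  else
    if pvPropagate (in_left.getD i (none, 0)) then
      (outr.set i (in_left.getD i (none, 0)), rf.set i false, (i : Int) - 1)
    else
      (outr.set i (in_left.getD i (none, 0)), rf.set i true, last)

-- A's loop, iterating i, i-1, ..., 0
def pvLoopA (in_left : List (Option Int × Int)) :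
    Nat → (List (Option Int × Int) × List Bool × Int) →
    List (Option Int × Int) × List Bool × Int
  | 0, st => pvStepA in_left st 0
  | Nat.succ j, st => pvLoopA in_left j (pvStepA in_left st (j+1))

def condense_down (in_left : List (Option Int × Int)) : (List (Option Int × Int)) × Int :=
  match in_left.length with
  | 0 => ([], 0)  -- Python raises IndexError here (in_left[-1] on []); excluded by Pre_
  | Nat.succ m =>
    let nrow := m + 1
    let v := in_left.getD m (none, 0)
    let st0 : List (Option Int × Int) × List Bool × Int :=
      if pvPropagate v then
        ((List.replicate nrow ((none : Option Int), (0 : Int))).set m v,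
         (List.replicate nrow false).set m false, (m : Int) - 1)
      else
        ((List.replicate nrow ((none : Option Int), (0 : Int))).set m v,
         (List.replicate nrow false).set m true, (m : Int))
    -- range(nrow-2, -1, -1) is empty when nrow = 1
    let res := match m with
      | 0 => st0
      | Nat.succ j => pvLoopA in_left j st0
    (res.1, res.2.2)

-- ===== PORT B =====
-- suffix-OR scan: row i of the result is true iff some row j >= i has in_left[j][1] <= 0
def pvFreeList (l : List (Option Int × Int)) : List Bool :=
  match l with
  | [] => []
  | v :: t =>
    let ft := pvFreeList t
    ((!pvPropagate v) || ft.headD false) :: ft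

def condense_down_alt (in_left : List (Option Int × Int)) : (List (Option Int × Int)) × Int :=
  let n := in_left.length
  let free := pvFreeList in_left
  let out_right := (List.range n).map (fun k =>
    if k = 0 then
      (if n = 1 || !(free.getD 1 false) then in_left.getD 0 (none, 0)
       else ((none : Option Int), (0 : Int)))
    else if free.getD k false then in_left.getD (k-1) (none, 0)
    else in_left.getD k (none, 0))
  let last : Int :=
    match in_left.findIdx? pvPropagate with
    | none => (n : Int) - 1
    | some m =>
      if m = n - 1 then (n : Int) - 2
      else if free.getD (m+1) false then (m : Int)
      else (m : Int) - 1
  (out_right, last)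

-- ===== PRECONDITION & SPEC =====
-- Pre_ excludes only the empty list, on which Python A raises IndexError.
def Pre_condense_down (in_left : List (Option Int × Int)) : Prop := in_left ≠ []
instance (in_left : List (Option Int × Int)) : Decidable (Pre_condense_down in_left) := by
  unfold Pre_condense_down; infer_instance
def pvWitness_condense_down : (List (Option Int × Int)) := [(some 1, 1), (none, 0)]

def Spec_condense_down (in_left : List (Option Int × Int)) (out : (List (Option Int × Int)) × Int) : Prop := out = condense_down_alt in_left
instance (in_left : List (Option Int × Int)) (out : (List (Option Int × Int)) × Int) : Decidable (Spec_condense_down in_left out) := by unfold Spec_condense_down; infer_instance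

-- ===== CLAIM (what is proved, stated in full; the proofs are below) =====
def Claim_equal_condense_down : Prop := ∀ (in_left : List (Option Int × Int)), Dom_condense_down in_left → Pre_condense_down in_left → Spec_condense_down in_left (condense_down in_left)

-- ===== LEMMAS AND PROOFS =====
-- closed-form state of A's loop after it has processed the indices n-2 ... i

def pvD : Option Int × Int := (none, 0)

def pvFreeJ (l : List (Option Int × Int)) (j : Nat) : Bool :=
  (l.drop j).any (fun v => !pvPropagate v)

def pvOutSpec (l : List (Option Int × Int)) (i : Nat) : List (Option Int × Int) :=
  (List.range l.length).map (fun k =>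
    if k < i then pvD
    else if k = i then (if pvFreeJ l (i+1) then pvD else l.getD i pvD)
    else if pvFreeJ l k then l.getD (k-1) pvD else l.getD k pvD)

def pvRfSpec (l : List (Option Int × Int)) (i : Nat) : List Bool :=
  (List.range l.length).map (fun j => if j < i then false else pvFreeJ l j)

def pvLastSpec (l : List (Option Int × Int)) (i : Nat) : Int :=
  match (l.drop i).findIdx? pvPropagate with
  | none => (l.length : Int) - 1
  | some r =>
    if i + r = l.length - 1 then (l.length : Int) - 2
    else if pvFreeJ l (i + r + 1) then ((i + r : Nat) : Int)
    else ((i + r : Nat) : Int) - 1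

def pvSpecSt (l : List (Option Int × Int)) (i : Nat) :
    List (Option Int × Int) × List Bool × Int :=
  (pvOutSpec l i, pvRfSpec l i, pvLastSpec l i)

theorem pv_getD_map_range {α : Type} (n j : Nat) (f : Nat → α) (d : α) :
    (((List.range n).map f).getD j d) = if j < n then f j else d := by
  by_cases h : j < n
  · simp [List.getD, h]
  · rw [List.getD_eq_default _ _ (by simpa using Nat.le_of_not_lt h)]
    simp [h]

theorem pv_freeJ_succ (l : List (Option Int × Int)) (i : Nat) (h : i < l.length) :
    pvFreeJ l i = ((!pvPropagate (l.getD i pvD)) || pvFreeJ l (i+1)) := by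
  unfold pvFreeJ
  rw [List.drop_eq_getElem_cons h, List.any_cons]
  simp only [List.getD, List.getElem?_eq_getElem h, Option.getD_some]

theorem pv_freeJ_ge (l : List (Option Int × Int)) (j : Nat) (h : l.length ≤ j) :
    pvFreeJ l j = false := by
  unfold pvFreeJ
  rw [List.drop_eq_nil_of_le h]
  simp

theorem pv_freeList_getD (l : List (Option Int × Int)) (j : Nat) :
    (pvFreeList l).getD j false = pvFreeJ l j := by
  induction l generalizing j with
  | nil => simp [pvFreeList, pvFreeJ]
  | cons v t ih =>
    cases j with
    | zero =>
      have h0 : (pvFreeList t).headD false = pvFreeJ t 0 := by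
        rw [← ih 0]; cases pvFreeList t <;> simp [List.getD]
      show ((!pvPropagate v || (pvFreeList t).headD false) :: pvFreeList t).getD 0 false = _
      rw [List.getD_cons_zero, h0]
      simp [pvFreeJ]
    | succ j =>
      show ((!pvPropagate v || (pvFreeList t).headD false) :: pvFreeList t).getD (j+1) false = _
      rw [List.getD_cons_succ, ih j]
      simp [pvFreeJ]

theorem pv_lastSpec_shift (l : List (Option Int × Int)) (i : Nat) (h : i < l.length)
    (hp : pvPropagate (l.getD i pvD) = false) :
    pvLastSpec l i = pvLastSpec l (i+1) := by
  unfold pvLastSpec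
  rw [List.drop_eq_getElem_cons h, List.findIdx?_cons]
  have hp' : pvPropagate l[i] = false := by
    simpa only [List.getD, List.getElem?_eq_getElem h, Option.getD_some] using hp
  rw [hp']
  simp only [Bool.false_eq_true, if_false]
  cases hfi : (l.drop (i+1)).findIdx? pvPropagate with
  | none => simp
  | some r =>
    simp only [Option.map_some]
    have e : i + (r + 1) = i + 1 + r := by omega
    rw [e]

theorem pv_base (l : List (Option Int × Int)) (m : Nat) (hm : l.length = m + 1) :
    (if pvPropagate (l.getD m pvD) then
        ((List.replicate (m+1) pvD).set m (l.getD m pvD),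
         (List.replicate (m+1) false).set m false, (m : Int) - 1)
      else
        ((List.replicate (m+1) pvD).set m (l.getD m pvD),
         (List.replicate (m+1) false).set m true, (m : Int))) = pvSpecSt l m := by
  have hfm1 : pvFreeJ l (m+1) = false := pv_freeJ_ge l (m+1) (by omega)
  have hfm : pvFreeJ l m = !pvPropagate (l.getD m pvD) := by
    rw [pv_freeJ_succ l m (by omega), hfm1]; simp
  have hdrop : l.drop m = [l.getD m pvD] := by
    rw [List.drop_eq_getElem_cons (by omega)]
    rw [List.drop_eq_nil_of_le (by omega)]
    simp only [List.getD, List.getElem?_eq_getElem (by omega : m < l.length), Option.getD_some]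
  have hout : (List.replicate (m+1) pvD).set m (l.getD m pvD)
      = pvOutSpec l m := by
    apply List.ext_getElem
    · simp [pvOutSpec, hm]
    · intro k h1 h2
      simp only [pvOutSpec, List.getElem_map, List.getElem_range, List.getElem_set,
        List.getElem_replicate]
      have hk : k < m + 1 := by simpa [hm] using h1
      by_cases hkm : m = k
      · subst hkm; simp [hfm1, pvD]
      · have : k < m := by omega
        simp [hkm, this, pvD]
  have hrf : ∀ b, b = !pvPropagate (l.getD m pvD) →
      (List.replicate (m+1) false).set m b = pvRfSpec l m := by
    intro b hb
    apply List.ext_getElem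
    · simp [pvRfSpec, hm]
    · intro k h1 h2
      simp only [pvRfSpec, List.getElem_map, List.getElem_range, List.getElem_set,
        List.getElem_replicate]
      have hk : k < m + 1 := by simpa using h1
      by_cases hkm : m = k
      · subst hkm; simp [hb, hfm]
      · have : k < m := by omega
        simp [hkm, this]
  have hlast : pvLastSpec l m =
      (if pvPropagate (l.getD m pvD) then (m : Int) - 1 else (m : Int)) := by
    unfold pvLastSpec
    rw [hdrop, List.findIdx?_cons, List.findIdx?_nil]
    cases hp : pvPropagate (l.getD m pvD) with
    | false =>
      simp only [Bool.false_eq_true, if_false, Option.map_none]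
      simp [hm]
    | true =>
      simp only [if_true]
      have e : m + 0 = l.length - 1 := by omega
      simp only [e, if_true, hm]
      push_cast
      ring
  cases hp : pvPropagate (l.getD m pvD) with
  | false =>
    simp only [Bool.false_eq_true, if_false, pvSpecSt]
    rw [hout, hrf true (by rw [hp]; rfl), hlast, hp]
    simp
  | true =>
    simp only [if_true, pvSpecSt]
    rw [hout, hrf false (by rw [hp]; rfl), hlast, hp]
    simp

theorem pv_step (l : List (Option Int × Int)) (i : Nat) (h : i + 1 < l.length) :
    pvStepA l (pvSpecSt l (i+1)) i = pvSpecSt l i := by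
  have hrfget : (pvRfSpec l (i+1)).getD (i+1) false = pvFreeJ l (i+1) := by
    unfold pvRfSpec
    rw [pv_getD_map_range]
    simp [h]
  have hfi : pvFreeJ l i = ((!pvPropagate (l.getD i pvD)) || pvFreeJ l (i+1)) :=
    pv_freeJ_succ l i (by omega)
  have houtT : pvFreeJ l (i+1) = true →
      (pvOutSpec l (i+1)).set (i+1) (l.getD i pvD) = pvOutSpec l i := by
    intro hf
    apply List.ext_getElem
    · simp [pvOutSpec]
    · intro k h1 h2
      simp only [pvOutSpec, List.getElem_map, List.getElem_range, List.getElem_set]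
      by_cases hk1 : i + 1 = k
      · subst hk1
        simp [hf, show ¬ (i+1 < i) by omega]
      · by_cases hki : k < i
        · simp [hk1, hki, show k < i + 1 by omega]
        · by_cases hke : k = i
          · subst hke
            simp [hf]
          · have hik : i + 1 < k := by omega
            simp [hk1, show ¬ k < i + 1 by omega, show ¬ k = i + 1 by omega,
              show ¬ k < i by omega, hke]
  have houtF : pvFreeJ l (i+1) = false →
      (pvOutSpec l (i+1)).set i (l.getD i pvD) = pvOutSpec l i := by
    intro hf
    apply List.ext_getElem
    · simp [pvOutSpec]
    · intro k h1 h2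
      simp only [pvOutSpec, List.getElem_map, List.getElem_range, List.getElem_set]
      by_cases hk0 : i = k
      · subst hk0
        simp [hf]
      · by_cases hki : k < i
        · simp [hk0, hki, show k < i + 1 by omega]
        · by_cases hke : k = i + 1
          · subst hke
            have hf2 : pvFreeJ l (i+1+1) = false := by
              have h2' := pv_freeJ_succ l (i+1) (by omega)
              rw [hf] at h2'
              cases hc : pvFreeJ l (i+1+1) with
              | false => rfl
              | true => rw [hc] at h2'; simp at h2'
            simp [hf, hf2, show ¬ (i + 1 < i) by omega]
          · have hik : i + 1 < k := by omega
            simp [hk0, show ¬ k < i + 1 by omega, hke, show ¬ k < i by omega,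
              show ¬ k = i by omega]
  have hrfSet : ∀ b, b = pvFreeJ l i → (pvRfSpec l (i+1)).set i b = pvRfSpec l i := by
    intro b hb
    apply List.ext_getElem
    · simp [pvRfSpec]
    · intro k h1 h2
      simp only [pvRfSpec, List.getElem_map, List.getElem_range, List.getElem_set]
      by_cases hk0 : i = k
      · subst hk0; simp [hb]
      · by_cases hki : k < i
        · simp [hk0, hki, show k < i + 1 by omega]
        · simp [hk0, hki, show ¬ k < i + 1 by omega]
  have hdropi : l.drop i = l.getD i pvD :: l.drop (i+1) := by
    rw [List.drop_eq_getElem_cons (by omega : i < l.length)]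
    simp only [List.getD, List.getElem?_eq_getElem (by omega : i < l.length), Option.getD_some]
  have hlastP : pvPropagate (l.getD i pvD) = true →
      pvLastSpec l i = (if pvFreeJ l (i+1) then (i : Int) else (i : Int) - 1) := by
    intro hp
    unfold pvLastSpec
    rw [hdropi, List.findIdx?_cons, hp]
    simp only [if_true]
    have e : ¬ (i = l.length - 1) := by omega
    simp [e]
  unfold pvStepA
  simp only [pvSpecSt]
  rw [show ((none : Option Int), (0 : Int)) = pvD from rfl]
  simp only [hrfget]
  cases hf : pvFreeJ l (i+1) with
  | true =>
    cases hp : pvPropagate (l.getD i pvD) with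
    | true =>
      simp only [if_true]
      rw [houtT hf, hrfSet true (by rw [hfi, hp, hf]; rfl), hlastP hp, hf]
      simp
    | false =>
      simp only [Bool.false_eq_true, if_false, if_true]
      rw [houtT hf, hrfSet true (by rw [hfi, hp, hf]; rfl),
        pv_lastSpec_shift l i (by omega) hp]
  | false =>
    cases hp : pvPropagate (l.getD i pvD) with
    | true =>
      simp only [Bool.false_eq_true, if_false, if_true]
      rw [houtF hf, hrfSet false (by rw [hfi, hp, hf]; rfl), hlastP hp, hf]
      simp
    | false =>
      simp only [Bool.false_eq_true, if_false]
      rw [houtF hf, hrfSet true (by rw [hfi, hp, hf]; rfl),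
        pv_lastSpec_shift l i (by omega) hp]

theorem pv_loop (l : List (Option Int × Int)) :
    ∀ i, i + 1 < l.length → pvLoopA l i (pvSpecSt l (i+1)) = pvSpecSt l 0 := by
  intro i
  induction i with
  | zero => intro h; simpa [pvLoopA] using pv_step l 0 h
  | succ j ih =>
    intro h
    show pvLoopA l j (pvStepA l (pvSpecSt l (j+1+1)) (j+1)) = pvSpecSt l 0
    rw [pv_step l (j+1) h]
    exact ih (by omega)

theorem pv_A_spec (l : List (Option Int × Int)) (hne : l ≠ []) :
    condense_down l = (pvOutSpec l 0, pvLastSpec l 0) := by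
  obtain ⟨m, hm⟩ : ∃ m, l.length = m + 1 := by
    cases l with
    | nil => exact absurd rfl hne
    | cons a t => exact ⟨t.length, rfl⟩
  unfold condense_down
  rw [hm]
  simp only
  rw [show ((none : Option Int), (0 : Int)) = pvD from rfl, pv_base l m hm]
  cases m with
  | zero => simp [pvSpecSt]
  | succ j =>
    simp only
    rw [pv_loop l j (by omega)]
    simp [pvSpecSt]

theorem pv_B_spec (l : List (Option Int × Int)) :
    condense_down_alt l = (pvOutSpec l 0, pvLastSpec l 0) := by
  unfold condense_down_alt
  simp only
  refine Prod.ext ?_ ?_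
  · -- output lists agree
    apply List.ext_getElem
    · simp [pvOutSpec]
    · intro k h1 h2
      simp only [pvOutSpec, List.getElem_map, List.getElem_range]
      have hk : k < l.length := by simpa using h1
      by_cases hk0 : k = 0
      · subst hk0
        rw [pv_freeList_getD]
        by_cases h1' : l.length = 1
        · have hz : pvFreeJ l 1 = false := pv_freeJ_ge l 1 (by omega)
          simp [h1', hz, pvD]
        · cases hf : pvFreeJ l 1 with
          | false => simp [h1', pvD]
          | true => simp [h1', pvD]
      · have e' : (pvFreeList l)[k]?.getD false = pvFreeJ l k := by
          simpa [List.getD] using pv_freeList_getD l k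
        simp [hk0, pvD, e']
  · -- last index agrees
    unfold pvLastSpec
    rw [List.drop_zero]
    cases hfi : l.findIdx? pvPropagate with
    | none => rfl
    | some r =>
      simp only [Nat.zero_add]
      rw [pv_freeList_getD]

-- ===== VERDICT (by name: the statement is the Claim_ definition above) =====
theorem condense_down_spec : Claim_equal_condense_down := by
  intro l _ hpre
  unfold Spec_condense_down
  rw [pv_A_spec l hpre, pv_B_spec l]
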